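-- pv_equiv track=rewrite | github.com/wangwangwar/nowcoder | nowcoder/hw-problem7-max-num-str.py | solution
-- ===== SOURCE A (Python) =====
-- def solution(s: str) -> str:
--     tmpStr = ""
--     maxStrList = [tmpStr]
--     maxStrLen = 0
--     for _, c in enumerate(s):
--         if c.isnumeric():
--             tmpStr += c
--             if len(tmpStr) > maxStrLen:
--                 maxStrList = [tmpStr]
--                 maxStrLen = len(tmpStr)
--             elif len(tmpStr) == maxStrLen:
--                 maxStrList.append(tmpStr)
--         else:
--             tmpStr = ""
--     string = "".join(maxStrList) + "," + str(maxStrLen)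
--     return string
-- ===== SOURCE B (Python) =====
-- def solution(s: str) -> str:
--     # Collect all maximal numeric runs, then select those of maximal length.
--     runs = []
--     i = 0
--     n = len(s)
--     while i < n:
--         if s[i].isnumeric():
--             j = i
--             while j < n and s[j].isnumeric():
--                 j += 1
--             runs.append(s[i:j])
--             i = j
--         else:
--             i += 1
--     maxlen = max((len(r) for r in runs), default=0)
--     return "".join(r for r in runs if len(r) == maxlen) + "," + str(maxlen)
-- ===== Notes on version B (the rewrite author's own statement) =====
-- stated objective: simpler
-- what changed: A tracks a growing temp string with reset/append max-bookkeeping inside one stateful character scan; B first segments the string into maximal numeric runs, then takes the maximum run length and joins all runs of that length.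
import Mathlib
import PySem

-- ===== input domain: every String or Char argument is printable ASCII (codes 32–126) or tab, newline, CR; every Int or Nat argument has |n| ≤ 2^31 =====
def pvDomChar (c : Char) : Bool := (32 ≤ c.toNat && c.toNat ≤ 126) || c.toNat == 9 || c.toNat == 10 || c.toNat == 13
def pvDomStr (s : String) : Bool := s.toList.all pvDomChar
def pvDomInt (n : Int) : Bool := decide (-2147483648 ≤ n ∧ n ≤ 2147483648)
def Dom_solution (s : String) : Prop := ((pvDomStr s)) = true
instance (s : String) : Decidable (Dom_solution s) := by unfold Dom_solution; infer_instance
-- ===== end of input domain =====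

-- B replaces A's stateful reset/append max-tracking scan by a collect-maximal-runs-then-select decomposition (objective: simpler).


-- c.isnumeric(): exact on the ASCII domain (Dom), where isnumeric coincides with isdigit
def pyIsNum (c : Char) : Bool := PySem.Chars.isdigit c

-- ===== PORT A =====
-- state = (tmpStr, maxStrList, maxStrLen); one fold step per character, exactly A's loop body
def stepA (st : List Char × List (List Char) × Nat) (c : Char) :
    List Char × List (List Char) × Nat :=
  let (t, L, m) := st
  if pyIsNum c then
    let t' := t ++ [c]
    if t'.length > m then (t', [t'], t'.length)
    else if t'.length = m then (t', L ++ [t'], m)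
    else (t', L, m)
  else ([], L, m)

def solution (s : String) : String :=
  let st := s.toList.foldl stepA ([], [[]], 0)
  String.mk (st.2.1.flatten ++ [','] ++ (PySem.Int.toStr (st.2.2 : Int)).toList)

-- ===== PORT B =====
-- maximal numeric runs, mirroring Source B's outer while loop (advance one char, or swallow a whole run)
def runsB (l : List Char) : List (List Char) :=
  match l with
  | [] => []
  | c :: cs =>
      if pyIsNum c then (c :: cs.takeWhile pyIsNum) :: runsB (cs.dropWhile pyIsNum)
      else runsB cs
termination_by l.length
decreasing_by
  · simpa using Nat.lt_succ_of_le (cs.length_dropWhile_le pyIsNum)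
  · simp

def solution_alt (s : String) : String :=
  let rs := runsB s.toList
  let m := rs.foldr (fun r acc => Nat.max r.length acc) 0
  String.mk ((rs.filter (fun r => r.length == m)).flatten ++ [','] ++ (PySem.Int.toStr (m : Int)).toList)

-- ===== PRECONDITION & SPEC =====
def Spec_solution (s : String) (out : String) : Prop := out = solution_alt s
instance (s : String) (out : String) : Decidable (Spec_solution s out) := by unfold Spec_solution; infer_instance

-- ===== CLAIM (what is proved, stated in full; the proofs are below) =====
def Claim_equal_solution : Prop := ∀ (s : String), Dom_solution s → Spec_solution s (solution s)

-- ===== LEMMAS AND PROOFS =====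

-- foldr-max of run lengths (B's maxlen computation, on an arbitrary run list)
def fm (rs : List (List Char)) : Nat := rs.foldr (fun r acc => Nat.max r.length acc) 0

-- max run length of a string
def mrl (l : List Char) : Nat := fm (runsB l)

-- the runs of maximal length
def sel (l : List Char) : List (List Char) := (runsB l).filter (fun r => r.length == mrl l)

-- the list component A's fold ends with, in terms of B's decomposition
def listRes (l : List Char) (L : List (List Char)) (m : Nat) : List (List Char) :=
  if m < mrl l then sel l else if mrl l = m then L ++ sel l else L

theorem mem_le_fm (rs : List (List Char)) : ∀ x ∈ rs, x.length ≤ fm rs := by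
  induction rs with
  | nil => simp
  | cons y ys ih =>
    intro x hx
    rcases List.mem_cons.mp hx with hx | hx
    · subst hx; simp [fm]
    · have := ih x hx
      simp [fm] at this ⊢
      right; exact this

theorem filter_big_nil (rs : List (List Char)) (M : Nat) (h : fm rs < M) :
    rs.filter (fun r => r.length == M) = [] := by
  apply List.filter_eq_nil_iff.mpr
  intro x hx
  have := mem_le_fm rs x hx
  simp; omega

theorem dropWhile_head_false {p : Char → Bool} {xs : List Char} {y : Char} {ys : List Char}
    (h : xs.dropWhile p = y :: ys) : p y = false := by
  induction xs with
  | nil => simp at h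
  | cons a as ih =>
    by_cases hp : p a
    · exact ih (by simpa [List.dropWhile, hp] using h)
    · simp [List.dropWhile, hp] at h
      simp [← h.1, hp]

-- folding A's step over a pure numeric run r from state (t, L, m), t.length ≤ m
theorem run_fold (r : List Char) (t : List Char) (L : List (List Char)) (m : Nat)
    (hr : ∀ c ∈ r, pyIsNum c = true) (ht : t.length ≤ m) :
    r.foldl stepA (t, L, m) =
      (t ++ r,
       if r.length = 0 then L
       else if t.length + r.length < m then L
       else if t.length + r.length = m then L ++ [t ++ r]
       else [t ++ r],
       Nat.max m (t.length + r.length)) := by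
  induction r generalizing t L m with
  | nil => simp [Nat.max_eq_left ht]
  | cons c r' ih =>
    have hc : pyIsNum c = true := hr c (by simp)
    have hr' : ∀ d ∈ r', pyIsNum d = true := fun d hd => hr d (by simp [hd])
    have hassoc : t ++ [c] ++ r' = t ++ c :: r' := by simp
    rcases Nat.lt_trichotomy m (t.length + 1) with hgt | heq | hlt
    · -- t.length + 1 > m, i.e. t.length = m : the "greater" branch resets
      have hstep : stepA (t, L, m) c = (t ++ [c], [t ++ [c]], t.length + 1) := by
        simp only [stepA]
        rw [if_pos hc, if_pos (by simp; omega : (t ++ [c]).length > m)]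
        simp
      rw [List.foldl_cons, hstep, ih _ _ _ hr' (by simp : (t ++ [c]).length ≤ t.length + 1)]
      rw [Prod.mk.injEq, Prod.mk.injEq]
      refine ⟨by simp, ?_, ?_⟩
      · rw [hassoc]
        simp only [List.length_append, List.length_cons, List.length_nil]
        split_ifs <;> first | rfl | (exfalso; omega) | simp_all [List.length_eq_zero_iff]
      · simp only [List.length_append, List.length_cons, List.length_nil, Nat.max_def]
        split_ifs <;> omega
    · -- t.length + 1 = m : the elif appends
      have hstep : stepA (t, L, m) c = (t ++ [c], L ++ [t ++ [c]], m) := by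
        simp only [stepA]
        rw [if_pos hc, if_neg (by simp; omega : ¬ (t ++ [c]).length > m), if_pos (by simp; omega)]
      rw [List.foldl_cons, hstep, ih _ _ _ hr' (by simp; omega : (t ++ [c]).length ≤ m)]
      rw [Prod.mk.injEq, Prod.mk.injEq]
      refine ⟨by simp, ?_, ?_⟩
      · rw [hassoc]
        simp only [List.length_append, List.length_cons, List.length_nil]
        split_ifs <;> first | rfl | (exfalso; omega) | simp_all [List.length_eq_zero_iff]
      · simp only [List.length_append, List.length_cons, List.length_nil, Nat.max_def]
        split_ifs <;> omega
    · -- t.length + 1 < m : nothing changes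
      have hstep : stepA (t, L, m) c = (t ++ [c], L, m) := by
        simp only [stepA]
        rw [if_pos hc, if_neg (by simp; omega : ¬ (t ++ [c]).length > m), if_neg (by simp; omega)]
      rw [List.foldl_cons, hstep, ih _ _ _ hr' (by simp; omega : (t ++ [c]).length ≤ m)]
      rw [Prod.mk.injEq, Prod.mk.injEq]
      refine ⟨by simp, ?_, ?_⟩
      · rw [hassoc]
        simp only [List.length_append, List.length_cons, List.length_nil]
        split_ifs <;> first | rfl | (exfalso; omega) | simp_all [List.length_eq_zero_iff]
      · simp only [List.length_append, List.length_cons, List.length_nil, Nat.max_def]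
        split_ifs <;> omega

-- the pure bookkeeping step: how A's final list absorbs one leading run r
theorem listRes_step (r : List Char) (rs : List (List Char)) (L : List (List Char))
    (m M N : Nat) (hb : 1 ≤ r.length)
    (hM : M = Nat.max r.length (fm rs)) (hN : N = Nat.max m r.length) :
    (if m < M then (r :: rs).filter (fun x => x.length == M)
     else if M = m then L ++ (r :: rs).filter (fun x => x.length == M)
     else L)
    =
    (if N < fm rs then rs.filter (fun x => x.length == fm rs)
     else if fm rs = N then
        (if r.length = 0 then L else if r.length < m then L
         else if r.length = m then L ++ [r] else [r]) ++
          rs.filter (fun x => x.length == fm rs)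
     else (if r.length = 0 then L else if r.length < m then L
           else if r.length = m then L ++ [r] else [r])) := by
  have hMa : r.length ≤ M := by rw [hM]; exact Nat.le_max_left _ _
  have hMb : fm rs ≤ M := by rw [hM]; exact Nat.le_max_right _ _
  have hMc : M = r.length ∨ M = fm rs := by rw [hM]; exact max_choice _ _
  have hNa : m ≤ N := by rw [hN]; exact Nat.le_max_left _ _
  have hNb : r.length ≤ N := by rw [hN]; exact Nat.le_max_right _ _
  have hNc : N = m ∨ N = r.length := by rw [hN]; exact max_choice _ _
  clear hM hN
  have hfil : ∀ M' : Nat, (r :: rs).filter (fun x => x.length == M') =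
      (if r.length = M' then [r] else []) ++ rs.filter (fun x => x.length == M') := by
    intro M'
    rw [List.filter_cons]
    by_cases h : r.length = M' <;> simp [h]
  rcases Nat.lt_trichotomy (fm rs) N with h1 | h1 | h1
  · -- fm rs < N : the right side keeps only the run's contribution
    conv_rhs => rw [if_neg (by omega : ¬ N < fm rs), if_neg (by omega : ¬ fm rs = N)]
    rcases Nat.lt_trichotomy r.length m with h2 | h2 | h2
    · have hN' : N = m := by rcases hNc with h | h <;> omega
      have hM' : M < m := by rcases hMc with h | h <;> omega
      conv_rhs => rw [if_neg (by omega : ¬ r.length = 0), if_pos h2]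
      rw [if_neg (by omega : ¬ m < M), if_neg (by omega : ¬ M = m)]
    · have hN' : N = m := by rcases hNc with h | h <;> omega
      have hM' : M = r.length := by rcases hMc with h | h <;> omega
      conv_rhs => rw [if_neg (by omega : ¬ r.length = 0),
        if_neg (by omega : ¬ r.length < m), if_pos h2]
      rw [if_neg (by omega : ¬ m < M), if_pos (by omega : M = m), hfil M,
          if_pos (by omega : r.length = M), filter_big_nil rs M (by omega)]
      simp
    · have hN' : N = r.length := by rcases hNc with h | h <;> omega
      have hM' : M = r.length := by rcases hMc with h | h <;> omega
      conv_rhs => rw [if_neg (by omega : ¬ r.length = 0),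
        if_neg (by omega : ¬ r.length < m), if_neg (by omega : ¬ r.length = m)]
      rw [if_pos (by omega : m < M), hfil M, if_pos (by omega : r.length = M),
          filter_big_nil rs M (by omega)]
      simp
  · -- fm rs = N : the run's ties and the later runs both survive
    conv_rhs => rw [if_neg (by omega : ¬ N < fm rs), if_pos h1]
    rcases Nat.lt_trichotomy r.length m with h2 | h2 | h2
    · have hN' : N = m := by rcases hNc with h | h <;> omega
      have hM' : M = m := by rcases hMc with h | h <;> omega
      conv_rhs => rw [if_neg (by omega : ¬ r.length = 0), if_pos h2]
      rw [if_neg (by omega : ¬ m < M), if_pos (by omega : M = m), hfil M,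
          if_neg (by omega : ¬ r.length = M), show M = fm rs by omega]
      simp
    · have hN' : N = m := by rcases hNc with h | h <;> omega
      have hM' : M = m := by rcases hMc with h | h <;> omega
      conv_rhs => rw [if_neg (by omega : ¬ r.length = 0),
        if_neg (by omega : ¬ r.length < m), if_pos h2]
      rw [if_neg (by omega : ¬ m < M), if_pos (by omega : M = m), hfil M,
          if_pos (by omega : r.length = M), show M = fm rs by omega]
      simp
    · have hN' : N = r.length := by rcases hNc with h | h <;> omega
      have hM' : M = r.length := by rcases hMc with h | h <;> omega
      conv_rhs => rw [if_neg (by omega : ¬ r.length = 0),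
        if_neg (by omega : ¬ r.length < m), if_neg (by omega : ¬ r.length = m)]
      rw [if_pos (by omega : m < M), hfil M, if_pos (by omega : r.length = M),
          show M = fm rs by omega]
  · -- N < fm rs : a longer run comes later, the run's contribution dies
    have hM' : M = fm rs := by rcases hMc with h | h <;> omega
    conv_rhs => rw [if_pos h1]
    rw [if_pos (by omega : m < M), hfil M, if_neg (by omega : ¬ r.length = M),
        show M = fm rs by omega]
    simp

theorem main_fold : ∀ n (l : List Char), l.length ≤ n → ∀ (L : List (List Char)) (m : Nat),
    (l.foldl stepA ([], L, m)).2 = (listRes l L m, Nat.max m (mrl l)) := by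
  intro n
  induction n with
  | zero =>
    intro l hl L m
    have : l = [] := List.length_eq_zero_iff.mp (Nat.le_zero.mp hl)
    subst this
    simp [listRes, mrl, fm, sel, runsB]
  | succ n ih =>
    intro l hl L m
    match l with
    | [] => simp [listRes, mrl, fm, sel, runsB]
    | c :: cs =>
      by_cases hc : pyIsNum c = true
      · -- a numeric run starts here
        set r : List Char := c :: cs.takeWhile pyIsNum with hrdef
        set rest : List Char := cs.dropWhile pyIsNum with hrestdef
        have hsplit : c :: cs = r ++ rest := by
          simp [hrdef, hrestdef]
        have hrall : ∀ d ∈ r, pyIsNum d = true := by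
          intro d hd
          rw [hrdef] at hd
          rcases List.mem_cons.mp hd with h | h
          · subst h; exact hc
          · exact List.mem_takeWhile_imp h
        have hruns : runsB (c :: cs) = r :: runsB rest := by
          rw [runsB, if_pos hc, ← hrdef, ← hrestdef]
        have hrne : r ≠ [] := by simp [hrdef]
        have hb : 1 ≤ r.length := List.length_pos_of_ne_nil hrne
        have hmrl : mrl (c :: cs) = Nat.max r.length (mrl rest) := by
          simp [mrl, fm, hruns]
        have hfold : (c :: cs).foldl stepA ([], L, m) =
            rest.foldl stepA (r.foldl stepA ([], L, m)) := by
          rw [hsplit, List.foldl_append]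
        have hrun := run_fold r [] L m hrall (by simp)
        simp only [List.nil_append, List.length_nil, Nat.zero_add] at hrun
        set L₁ : List (List Char) :=
          if r.length = 0 then L else if r.length < m then L
          else if r.length = m then L ++ [r] else [r] with hL₁
        rw [hfold, hrun]
        match hrest : rest with
        | [] =>
          -- the run is a suffix of the whole string
          have hmr : mrl (c :: cs) = r.length := by
            rw [hmrl]
            simp [mrl, fm, runsB]
          simp only [List.foldl_nil]
          refine Prod.ext ?_ ?_
          · show L₁ = listRes (c :: cs) L m
            rw [listRes, hmr, hL₁]
            have hsel : sel (c :: cs) = [r] := by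
              simp [sel, hruns, runsB, hmr]
            rw [hsel]
            rcases Nat.lt_trichotomy r.length m with h | h | h
            · rw [if_neg (by omega), if_pos h, if_neg (by omega), if_neg (by omega)]
            · rw [if_neg (by omega), if_neg (by omega), if_pos h,
                  if_neg (by omega), if_pos h]
            · rw [if_neg (by omega), if_neg (by omega), if_neg (by omega), if_pos h]
          · show Nat.max m r.length = Nat.max m (mrl (c :: cs))
            rw [hmr]
        | d :: rest' =>
          have hd : pyIsNum d = false := dropWhile_head_false hrestdef.symm
          have hstep : stepA (r, L₁, Nat.max m r.length) d = ([], L₁, Nat.max m r.length) := by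
            simp [stepA, hd]
          rw [List.foldl_cons, hstep]
          have hlen' : rest'.length ≤ n := by
            have h1 : (cs.dropWhile pyIsNum).length ≤ cs.length := cs.length_dropWhile_le pyIsNum
            rw [← hrestdef] at h1
            simp at h1 hl
            omega
          rw [ih rest' hlen' L₁ (Nat.max m r.length)]
          have hrunsrest : runsB (d :: rest') = runsB rest' := by
            rw [runsB]; simp [hd]
          have hmrlrest : mrl (d :: rest') = mrl rest' := by simp [mrl, hrunsrest]
          refine Prod.ext ?_ ?_
          · show listRes rest' L₁ (Nat.max m r.length) = listRes (c :: cs) L m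
            have key := listRes_step r (runsB rest') L m
              (Nat.max r.length (fm (runsB rest'))) (Nat.max m r.length) hb rfl rfl
            rw [listRes, listRes, hL₁, hmrl, hmrlrest]
            rw [sel, sel, hruns, hrunsrest, hmrl, hmrlrest]
            exact key.symm
          · show Nat.max (Nat.max m r.length) (mrl rest') = Nat.max m (mrl (c :: cs))
            rw [hmrl, hmrlrest]
            exact Nat.max_assoc _ _ _
      · -- non-numeric head: the state is unchanged (tmp is already [])
        have hstep : stepA ([], L, m) c = ([], L, m) := by simp [stepA, hc]
        rw [List.foldl_cons, hstep, ih cs (by simp at hl; omega) L m]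
        have hruns : runsB (c :: cs) = runsB cs := by rw [runsB]; simp [hc]
        simp [listRes, mrl, fm, sel, hruns]

-- ===== VERDICT (by name: the statement is the Claim_ definition above) =====
theorem solution_spec : Claim_equal_solution := by
  intro s _
  unfold Spec_solution solution solution_alt
  have h := main_fold s.toList.length s.toList (le_refl _) [[]] 0
  simp only [h, Nat.zero_max]
  have hflat : (listRes s.toList [[]] 0).flatten = (sel s.toList).flatten := by
    rw [listRes]
    rcases Nat.eq_zero_or_pos (mrl s.toList) with h0 | hpos
    · rw [if_neg (by omega), if_pos h0]
      simp
    · rw [if_pos hpos]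
  rw [hflat]
  rfl
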